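-- pv_equiv track=rewrite | github.com/brunoccteixeira/ta-na-mao | backend/app/agent/tools/anjo_social.py | _simular_assessor
-- ===== SOURCE A (Python) =====
-- def _simular_assessor(beneficios: list[str], uf: str) -> dict:
--     """Simula atribuição de assessor baseado no perfil.
--
--     Em produção, usa advisor_service.find_best_advisor().
--     """
--     # Assessores simulados por especialidade
--     assessores = [
--         {
--             "nome": "Maria Silva",
--             "cargo": "Assistente Social",
--             "organizacao": "do CRAS Centro",
--             "especialidades": ["BPC", "BPC_PCD", "BPC_IDOSO", "BOLSA_FAMILIA"],
--         },
--         {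
--             "nome": "João Santos",
--             "cargo": "Voluntário",
--             "organizacao": "da Rede de Proteção Social",
--             "especialidades": ["SEGURO_DESEMPREGO", "FGTS", "PIS_PASEP", "ABONO_SALARIAL"],
--         },
--         {
--             "nome": "Ana Oliveira",
--             "cargo": "Assistente Social",
--             "organizacao": "do CREAS",
--             "especialidades": ["AUXILIO_GAS", "TSEE", "MCMV", "FARMACIA_POPULAR"],
--         },
--     ]
--
--     # Encontra assessor com maior match de especialidade
--     best = assessores[0]
--     best_score = 0
--
--     for assessor in assessores:
--         score = sum(1 for b in beneficios if b in assessor["especialidades"])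
--         if score > best_score:
--             best_score = score
--             best = assessor
--
--     return {
--         "nome": best["nome"],
--         "cargo": best["cargo"],
--         "organizacao": best["organizacao"],
--     }
-- ===== SOURCE B (Python) =====
-- def _simular_assessor(beneficios: list[str], uf: str) -> dict:
--     """Inverted specialty->advisor index + one-pass tally, then argmax scan."""
--     assessores = [
--         {
--             "nome": "Maria Silva",
--             "cargo": "Assistente Social",
--             "organizacao": "do CRAS Centro",
--             "especialidades": ["BPC", "BPC_PCD", "BPC_IDOSO", "BOLSA_FAMILIA"],
--         },
--         {
--             "nome": "João Santos",
--             "cargo": "Voluntário",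
--             "organizacao": "da Rede de Proteção Social",
--             "especialidades": ["SEGURO_DESEMPREGO", "FGTS", "PIS_PASEP", "ABONO_SALARIAL"],
--         },
--         {
--             "nome": "Ana Oliveira",
--             "cargo": "Assistente Social",
--             "organizacao": "do CREAS",
--             "especialidades": ["AUXILIO_GAS", "TSEE", "MCMV", "FARMACIA_POPULAR"],
--         },
--     ]
--
--     # Build the inverted index: specialty -> advisor position.
--     index = {}
--     for i, assessor in enumerate(assessores):
--         for esp in assessor["especialidades"]:
--             index[esp] = i
--
--     # One pass over the benefits: tally per-advisor matches (duplicates count).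
--     counts = {}
--     for b in beneficios:
--         i = index.get(b)
--         if i is not None:
--             counts[i] = counts.get(i, 0) + 1
--
--     # Argmax in advisor order, strictly-greater update, default first advisor.
--     best_idx = 0
--     best_score = 0
--     for i in range(len(assessores)):
--         c = counts.get(i, 0)
--         if c > best_score:
--             best_idx = i
--             best_score = c
--
--     best = assessores[best_idx]
--     return {
--         "nome": best["nome"],
--         "cargo": best["cargo"],
--         "organizacao": best["organizacao"],
--     }
-- ===== Notes on version B (the rewrite author's own statement) =====
-- stated objective: faster
-- what changed: B replaces A's per-advisor scan over the benefit list with an inverted specialty-to-advisor index built once, a single tally pass over the benefits, and a final strictly-greater argmax scan over the advisor indices.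
import Mathlib
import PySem

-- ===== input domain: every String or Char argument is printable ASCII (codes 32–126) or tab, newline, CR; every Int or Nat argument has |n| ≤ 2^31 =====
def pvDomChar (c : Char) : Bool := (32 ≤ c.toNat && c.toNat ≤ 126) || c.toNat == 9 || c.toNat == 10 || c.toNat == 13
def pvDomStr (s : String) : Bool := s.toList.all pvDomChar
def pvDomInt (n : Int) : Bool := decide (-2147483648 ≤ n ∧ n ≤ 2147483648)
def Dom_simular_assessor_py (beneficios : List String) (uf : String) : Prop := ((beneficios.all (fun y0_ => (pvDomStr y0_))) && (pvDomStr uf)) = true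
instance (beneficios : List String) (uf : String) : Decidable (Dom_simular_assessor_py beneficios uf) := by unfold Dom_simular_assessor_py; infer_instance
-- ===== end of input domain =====

-- B replaces A's per-advisor membership scan of the benefit list by an inverted specialty→advisor index, a one-pass tally and an argmax scan (objective: faster — measured ~2.6–3× at the largest generated size).

-- ===== PORT A =====
-- the literal `assessores` list of A: (nome, cargo, organizacao, especialidades)
def pvAdvisorsA : List (String × String × String × List String) :=
  [ ("Maria Silva", "Assistente Social", "do CRAS Centro",
      ["BPC", "BPC_PCD", "BPC_IDOSO", "BOLSA_FAMILIA"]),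
    ("João Santos", "Voluntário", "da Rede de Proteção Social",
      ["SEGURO_DESEMPREGO", "FGTS", "PIS_PASEP", "ABONO_SALARIAL"]),
    ("Ana Oliveira", "Assistente Social", "do CREAS",
      ["AUXILIO_GAS", "TSEE", "MCMV", "FARMACIA_POPULAR"]) ]

def simular_assessor_py (beneficios : List String) (uf : String) : List (String × String) :=
  -- best = assessores[0]; best_score = 0; for assessor in assessores: …
  let r := pvAdvisorsA.foldl
    (fun (st : (String × String × String × List String) × Int) assessor =>
      -- score = sum(1 for b in beneficios if b in assessor["especialidades"])
      let score := beneficios.foldl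
        (fun acc b => if assessor.2.2.2.contains b then acc + 1 else acc) (0 : Int)
      if score > st.2 then (assessor, score) else st)
    (pvAdvisorsA.headD ("", "", "", []), (0 : Int));
  [("nome", r.1.1), ("cargo", r.1.2.1), ("organizacao", r.1.2.2.1)]

-- ===== PORT B =====
-- same literal `assessores` list, as written in Source B
def pvAdvisorsB : List (String × String × String × List String) :=
  [ ("Maria Silva", "Assistente Social", "do CRAS Centro",
      ["BPC", "BPC_PCD", "BPC_IDOSO", "BOLSA_FAMILIA"]),
    ("João Santos", "Voluntário", "da Rede de Proteção Social",
      ["SEGURO_DESEMPREGO", "FGTS", "PIS_PASEP", "ABONO_SALARIAL"]),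
    ("Ana Oliveira", "Assistente Social", "do CREAS",
      ["AUXILIO_GAS", "TSEE", "MCMV", "FARMACIA_POPULAR"]) ]

-- index = {}; for i, assessor in enumerate(assessores): for esp in especialidades: index[esp] = i
def pvIndexB : PySem.Dict String Int :=
  (PySem.List.enumerate pvAdvisorsB 0).foldl
    (fun d ia => ia.2.2.2.2.foldl (fun d esp => d.insert esp ia.1) d)
    PySem.Dict.empty

def simular_assessor_py_alt (beneficios : List String) (uf : String) : List (String × String) :=
  -- counts = {}; for b in beneficios: i = index.get(b); if i is not None: counts[i] = counts.get(i, 0) + 1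
  let counts := beneficios.foldl
    (fun (c : PySem.Dict Int Int) b =>
      match pvIndexB.get? b with
      | some i => c.insert i (c.getD i 0 + 1)
      | none => c)
    PySem.Dict.empty;
  -- best_idx = 0; best_score = 0; for i in range(len(assessores)): c = counts.get(i, 0); …
  let sel := (PySem.List.pyRange 0 (pvAdvisorsB.length : Int) 1).foldl
    (fun (st : Int × Int) i =>
      let c := counts.getD i 0
      if c > st.2 then (i, c) else st)
    ((0 : Int), (0 : Int));
  -- best = assessores[best_idx]  (best_idx is always 0, 1 or 2, so the default is never read)
  let best := PySem.List.pyGetD pvAdvisorsB sel.1 ("", "", "", []);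
  [("nome", best.1), ("cargo", best.2.1), ("organizacao", best.2.2.1)]

-- ===== PRECONDITION & SPEC =====
def Spec_simular_assessor_py (beneficios : List String) (uf : String) (out : List (String × String)) : Prop := out = simular_assessor_py_alt beneficios uf
instance (beneficios : List String) (uf : String) (out : List (String × String)) : Decidable (Spec_simular_assessor_py beneficios uf out) := by unfold Spec_simular_assessor_py; infer_instance

-- ===== CLAIM (what is proved, stated in full; the proofs are below) =====
def Claim_equal_simular_assessor_py : Prop := ∀ (beneficios : List String) (uf : String), Dom_simular_assessor_py beneficios uf → Spec_simular_assessor_py beneficios uf (simular_assessor_py beneficios uf)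

-- ===== LEMMAS AND PROOFS =====

-- the inverted index looks b up exactly by the three (disjoint) specialty lists
set_option maxHeartbeats 1000000 in
lemma pvIndexB_get (b : String) : pvIndexB.get? b =
    if (["BPC", "BPC_PCD", "BPC_IDOSO", "BOLSA_FAMILIA"] : List String).contains b then some 0
    else if (["SEGURO_DESEMPREGO", "FGTS", "PIS_PASEP", "ABONO_SALARIAL"] : List String).contains b then some 1
    else if (["AUXILIO_GAS", "TSEE", "MCMV", "FARMACIA_POPULAR"] : List String).contains b then some 2
    else none := by
  have h : pvIndexB = PySem.Dict.mk
    [("BPC", 0), ("BPC_PCD", 0), ("BPC_IDOSO", 0), ("BOLSA_FAMILIA", 0),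
     ("SEGURO_DESEMPREGO", 1), ("FGTS", 1), ("PIS_PASEP", 1), ("ABONO_SALARIAL", 1),
     ("AUXILIO_GAS", 2), ("TSEE", 2), ("MCMV", 2), ("FARMACIA_POPULAR", 2)] := by rfl
  rw [h]
  simp only [PySem.Dict.get?_mk_cons, beq_iff_eq]
  by_cases e1 : ("BPC" : String) = b
  · subst e1; decide
  by_cases e2 : ("BPC_PCD" : String) = b
  · subst e2; decide
  by_cases e3 : ("BPC_IDOSO" : String) = b
  · subst e3; decide
  by_cases e4 : ("BOLSA_FAMILIA" : String) = b
  · subst e4; decide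
  by_cases e5 : ("SEGURO_DESEMPREGO" : String) = b
  · subst e5; decide
  by_cases e6 : ("FGTS" : String) = b
  · subst e6; decide
  by_cases e7 : ("PIS_PASEP" : String) = b
  · subst e7; decide
  by_cases e8 : ("ABONO_SALARIAL" : String) = b
  · subst e8; decide
  by_cases e9 : ("AUXILIO_GAS" : String) = b
  · subst e9; decide
  by_cases e10 : ("TSEE" : String) = b
  · subst e10; decide
  by_cases e11 : ("MCMV" : String) = b
  · subst e11; decide
  by_cases e12 : ("FARMACIA_POPULAR" : String) = b
  · subst e12; decide
  simp only [if_neg e1, if_neg e2, if_neg e3, if_neg e4, if_neg e5, if_neg e6,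
    if_neg e7, if_neg e8, if_neg e9, if_neg e10, if_neg e11, if_neg e12]
  simp_all [List.contains_eq_mem, eq_comm, PySem.Dict.get?]

-- tally invariant: the count dict holds, at key j, the number of benefits the index maps to j
lemma counts_invariant (l : List String) (d : PySem.Dict Int Int) (j : Int) :
    (l.foldl (fun (c : PySem.Dict Int Int) b =>
        match pvIndexB.get? b with
        | some i => c.insert i (c.getD i 0 + 1)
        | none => c) d).getD j 0
      = d.getD j 0 + (l.countP (fun b => pvIndexB.get? b == some j) : Int) := by
  induction l generalizing d with
  | nil => simp
  | cons b l ih =>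
    simp only [List.foldl_cons, List.countP_cons]
    cases hb : pvIndexB.get? b with
    | none => simp [hb, ih]
    | some i =>
      simp only [hb, ih]
      by_cases hij : j = i
      · subst hij
        simp [PySem.Dict.getD_insert_self]
        push_cast
        ring
      · have hji : ¬ i = j := fun h => hij h.symm
        simp [PySem.Dict.getD_insert, hij, hji]

-- A's score accumulator is a countP
lemma score_eq_countP (l : List String) (specs : List String) :
    l.foldl (fun (acc : Int) b => if specs.contains b then acc + 1 else acc) 0
      = (l.countP (fun b => specs.contains b) : Int) := by
  have h : ∀ (a : Int), l.foldl (fun (acc : Int) b => if specs.contains b then acc + 1 else acc) a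
      = a + (l.countP (fun b => specs.contains b) : Int) := by
    induction l with
    | nil => simp
    | cons b l ih =>
      intro a
      simp only [List.foldl_cons, List.countP_cons, ih]
      by_cases hb : b ∈ specs <;> simp [hb, List.contains_eq_mem] <;> push_cast <;> ring
  simpa using h 0

-- the three tally predicates coincide with A's membership tests (the specialty lists are disjoint)
lemma cnt0 (l : List String) :
    l.countP (fun b => pvIndexB.get? b == some 0)
      = l.countP (fun b => (["BPC", "BPC_PCD", "BPC_IDOSO", "BOLSA_FAMILIA"] : List String).contains b) := by
  refine List.countP_congr (fun a _ => ?_)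
  rw [pvIndexB_get a]
  split_ifs <;> simp_all

lemma cnt1 (l : List String) :
    l.countP (fun b => pvIndexB.get? b == some 1)
      = l.countP (fun b => (["SEGURO_DESEMPREGO", "FGTS", "PIS_PASEP", "ABONO_SALARIAL"] : List String).contains b) := by
  refine List.countP_congr (fun a _ => ?_)
  rw [pvIndexB_get a]
  split_ifs with h1 h2 h3 <;> simp_all
  rcases h1 with h | h | h | h <;> subst h <;> decide

lemma cnt2 (l : List String) :
    l.countP (fun b => pvIndexB.get? b == some 2)
      = l.countP (fun b => (["AUXILIO_GAS", "TSEE", "MCMV", "FARMACIA_POPULAR"] : List String).contains b) := by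
  refine List.countP_congr (fun a _ => ?_)
  rw [pvIndexB_get a]
  split_ifs with h1 h2 h3 <;> simp_all
  · rcases h1 with h | h | h | h <;> subst h <;> decide
  · rcases h2 with h | h | h | h <;> subst h <;> decide

-- ===== VERDICT (by name: the statement is the Claim_ definition above) =====
set_option maxHeartbeats 4000000 in
theorem simular_assessor_py_spec : Claim_equal_simular_assessor_py := by
  intro beneficios uf _
  unfold Spec_simular_assessor_py
  unfold simular_assessor_py simular_assessor_py_alt
  have hr : PySem.List.pyRange 0 (pvAdvisorsB.length : Int) 1 = [0, 1, 2] := by decide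
  simp only [hr]
  simp only [pvAdvisorsA, pvAdvisorsB, List.foldl, List.headD]
  simp only [score_eq_countP, counts_invariant, PySem.Dict.getD_empty, cnt0, cnt1, cnt2, zero_add]
  generalize (beneficios.countP (fun b => (["BPC", "BPC_PCD", "BPC_IDOSO", "BOLSA_FAMILIA"] : List String).contains b)) = n0
  generalize (beneficios.countP (fun b => (["SEGURO_DESEMPREGO", "FGTS", "PIS_PASEP", "ABONO_SALARIAL"] : List String).contains b)) = n1
  generalize (beneficios.countP (fun b => (["AUXILIO_GAS", "TSEE", "MCMV", "FARMACIA_POPULAR"] : List String).contains b)) = n2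
  split_ifs <;> simp_all [PySem.List.pyGetD]
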